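-- pv_equiv track=rewrite | github.com/Lautarostuve/LexerPY | algoritmolexer.py | automatapuntoycoma
-- ===== SOURCE A (Python) =====
-- ESTADO_FINAL="Estado final"
--
-- ESTADO_TRAMPA="Estado trampa"
--
-- ESTADO_NO_FINAL="Estado aceptado"
--
-- def automatapuntoycoma(lexema):
--     estado = 0
--     estados_finales = [1]
--     for caracter in lexema:
--         if estado == 0 and caracter == ';':
--             estado = 1
--         else:
--             estado =-1
--             break
--
--     if estado == -1:
--         return ESTADO_TRAMPA
--     elif estado in estados_finales:
--         return ESTADO_FINAL
--     else:
--         return ESTADO_NO_FINAL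
-- ===== SOURCE B (Python) =====
-- ESTADO_FINAL="Estado final"
-- ESTADO_TRAMPA="Estado trampa"
-- ESTADO_NO_FINAL="Estado aceptado"
--
-- def automatapuntoycoma(lexema):
--     chars = list(lexema)
--     if not chars:
--         return ESTADO_NO_FINAL
--     elif len(chars) == 1 and chars[0] == ';':
--         return ESTADO_FINAL
--     else:
--         return ESTADO_TRAMPA
-- ===== Notes on version B (the rewrite author's own statement) =====
-- stated objective: simpler
-- what changed: Replaced the incremental state machine (loop with a state variable and break) by a closed-form check on the sequence's length and single element.
import Mathlib
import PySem

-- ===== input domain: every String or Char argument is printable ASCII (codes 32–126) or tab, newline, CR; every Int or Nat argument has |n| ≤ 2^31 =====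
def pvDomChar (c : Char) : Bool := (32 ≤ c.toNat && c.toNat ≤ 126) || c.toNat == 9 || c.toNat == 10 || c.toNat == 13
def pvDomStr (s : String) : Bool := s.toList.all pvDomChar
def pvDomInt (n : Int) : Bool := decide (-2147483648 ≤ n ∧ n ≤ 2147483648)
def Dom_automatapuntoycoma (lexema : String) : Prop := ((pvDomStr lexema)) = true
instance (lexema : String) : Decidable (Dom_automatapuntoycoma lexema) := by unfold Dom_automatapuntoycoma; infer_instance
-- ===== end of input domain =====

-- B replaces A's state-machine loop (state variable + break) by a closed-form length/content check; objective: simpler.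

-- ===== PORT A =====
-- the loop with break: returns the final value of `estado`
def pvLoopA : Int → List Char → Int
  | estado, [] => estado
  | estado, c :: rest =>
      if estado == 0 && c == ';' then pvLoopA 1 rest
      else (-1 : Int)   -- estado = -1; break

def automatapuntoycoma (lexema : String) : String :=
  let estado := pvLoopA 0 lexema.toList
  let estados_finales : List Int := [1]
  if estado = -1 then "Estado trampa"
  else if estado ∈ estados_finales then "Estado final"
  else "Estado aceptado"

-- ===== PORT B =====
def automatapuntoycoma_alt (lexema : String) : String :=
  let chars := lexema.toList
  if chars = [] then "Estado aceptado"
  else if chars.length = 1 ∧ chars[0]? = some ';' then "Estado final"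
  else "Estado trampa"

-- ===== PRECONDITION & SPEC =====
def Spec_automatapuntoycoma (lexema : String) (out : String) : Prop := out = automatapuntoycoma_alt lexema
instance (lexema : String) (out : String) : Decidable (Spec_automatapuntoycoma lexema out) := by unfold Spec_automatapuntoycoma; infer_instance

-- ===== CLAIM (what is proved, stated in full; the proofs are below) =====
def Claim_equal_automatapuntoycoma : Prop := ∀ (lexema : String), Dom_automatapuntoycoma lexema → Spec_automatapuntoycoma lexema (automatapuntoycoma lexema)

-- ===== LEMMAS AND PROOFS =====

theorem ports_agree (cs : List Char) :
    automatapuntoycoma (String.ofList cs) = automatapuntoycoma_alt (String.ofList cs) := by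
  match cs with
  | [] => rfl
  | [c] =>
      by_cases h : c = ';'
      · subst h; rfl
      · simp [automatapuntoycoma, automatapuntoycoma_alt, pvLoopA, h]
  | c :: d :: rest =>
      by_cases h : c = ';'
      · subst h
        by_cases h2 : d = ';'
        · subst h2; simp [automatapuntoycoma, automatapuntoycoma_alt, pvLoopA]
        · simp [automatapuntoycoma, automatapuntoycoma_alt, pvLoopA]
      · simp [automatapuntoycoma, automatapuntoycoma_alt, pvLoopA, h]

-- ===== VERDICT (by name: the statement is the Claim_ definition above) =====
theorem automatapuntoycoma_spec : Claim_equal_automatapuntoycoma := by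
  intro lexema _
  unfold Spec_automatapuntoycoma
  have h := ports_agree lexema.toList
  rwa [String.ofList_toList] at h
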